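-- pv_equiv track=rewrite | github.com/Scarygami/aoc2020 | 04/day4.py | is_valid_part2
-- ===== SOURCE A (Python) =====
-- def is_valid_part1(passport):
--     required = ["byr", "iyr", "eyr", "hgt", "hcl", "ecl", "pid"]
--
--     for part in required:
--         if part not in passport:
--             return False
--
--     return True
--
-- def is_valid_part2(passport):
--     if not is_valid_part1(passport):
--         return False
--
--     if not passport["byr"].isnumeric():
--         return False
--     byr = int(passport["byr"])
--     if byr < 1920 or byr > 2002:
--         return False
--
--     if not passport["iyr"].isnumeric():
--         return False
--     iyr = int(passport["iyr"])
--     if iyr < 2010 or iyr > 2020: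
--         return False
--
--     if not passport["eyr"].isnumeric():
--         return False
--     eyr = int(passport["eyr"])
--     if eyr < 2020 or eyr > 2030:
--         return False
--
--     h_unit = passport["hgt"][-2:]
--     h = passport["hgt"][:-2]
--     if not h.isnumeric():
--         return False
--     h = int(h)
--     if h_unit == "cm":
--         if h < 150 or h > 193:
--             return False
--     elif h_unit == "in":
--         if h < 59 or h > 76:
--             return False
--     else:
--         return False
--
--     if len(passport["hcl"]) != 7:
--         return False
--     if passport["hcl"][0] != "#":
--         return False
--
--     hcl = passport["hcl"][1:]
--     if not all(x in "0123456789abcdef" for x in hcl):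
--         return False
--
--     if passport["ecl"] not in ["amb", "blu", "brn", "gry", "grn", "hzl", "oth"]:
--         return False
--
--     if not passport["pid"].isnumeric():
--         return False
--     if len(passport["pid"]) != 9:
--         return False
--
--     return True
-- ===== SOURCE B (Python) =====
-- # Table-driven rewrite: one rules dict mapping each required field to a validator predicate.
--
-- def _hgt_ok(s):
--     unit = s[-2:]
--     num = s[:-2]
--     if not num.isnumeric():
--         return False
--     n = int(num)
--     if unit == "cm":
--         return 150 <= n <= 193
--     if unit == "in":
--         return 59 <= n <= 76
--     return False
--
-- _RULES = {
--     "byr": lambda s: s.isnumeric() and 1920 <= int(s) <= 2002,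
--     "iyr": lambda s: s.isnumeric() and 2010 <= int(s) <= 2020,
--     "eyr": lambda s: s.isnumeric() and 2020 <= int(s) <= 2030,
--     "hgt": _hgt_ok,
--     "hcl": lambda s: len(s) == 7 and s[0] == "#" and all(c in "0123456789abcdef" for c in s[1:]),
--     "ecl": lambda s: s in ["amb", "blu", "brn", "gry", "grn", "hzl", "oth"],
--     "pid": lambda s: s.isnumeric() and len(s) == 9,
-- }
--
-- def is_valid_part2(passport):
--     if any(k not in passport for k in _RULES):
--         return False
--     return all(check(passport[k]) for k, check in _RULES.items())
-- ===== Notes on version B (the rewrite author's own statement) =====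
-- stated objective: idiomatic
-- what changed: Replaces the long inlined if-chain with a rules table mapping each required field to a validator predicate: one presence pass over the table, then one pass applying each predicate.
import Mathlib
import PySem

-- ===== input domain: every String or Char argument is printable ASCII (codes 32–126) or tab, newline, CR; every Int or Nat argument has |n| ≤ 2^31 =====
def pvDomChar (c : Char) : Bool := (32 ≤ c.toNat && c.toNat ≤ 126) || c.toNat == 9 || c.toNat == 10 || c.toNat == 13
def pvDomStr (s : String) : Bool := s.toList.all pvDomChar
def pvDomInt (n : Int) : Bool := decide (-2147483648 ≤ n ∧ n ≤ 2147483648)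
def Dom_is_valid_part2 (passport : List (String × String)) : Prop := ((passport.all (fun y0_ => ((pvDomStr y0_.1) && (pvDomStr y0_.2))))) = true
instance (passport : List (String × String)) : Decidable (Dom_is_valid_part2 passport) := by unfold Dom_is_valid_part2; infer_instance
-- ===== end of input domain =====

-- B replaces A's long inlined if-chain by a rules table (field ↦ validator predicate) scanned in two passes; same cost, more idiomatic.
-- Python's dict membership 'k in passport' / lookup 'passport[k]' (first match under the assoc-list convention):
def pvContains (passport : List (String × String)) (k : String) : Bool :=
  passport.any (fun e => e.1 == k)
def pvGet (passport : List (String × String)) (k : String) : String :=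
  ((passport.find? (fun e => e.1 == k)).map (·.2)).getD ""
-- int(s): in both programs only evaluated after s.isnumeric() passed, so ofStr? is some; getD 0 is unreachable.
def pvInt (s : String) : Int := (PySem.Int.ofStr? s).getD 0
-- s.isnumeric() ported as PySem.Str.strIsdigit: identical on the ASCII domain Dom_is_valid_part2 admits.

-- ===== PORT A =====
def is_valid_part1 (passport : List (String × String)) : Bool :=
  (["byr", "iyr", "eyr", "hgt", "hcl", "ecl", "pid"]).all (fun part => pvContains passport part)

def is_valid_part2 (passport : List (String × String)) : Bool :=
  if !is_valid_part1 passport then false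
  else if !PySem.Str.strIsdigit (pvGet passport "byr") then false
  else
    let byr := pvInt (pvGet passport "byr")
    if byr < 1920 || byr > 2002 then false
    else if !PySem.Str.strIsdigit (pvGet passport "iyr") then false
    else
      let iyr := pvInt (pvGet passport "iyr")
      if iyr < 2010 || iyr > 2020 then false
      else if !PySem.Str.strIsdigit (pvGet passport "eyr") then false
      else
        let eyr := pvInt (pvGet passport "eyr")
        if eyr < 2020 || eyr > 2030 then false
        else
          let h_unit := PySem.Str.slice (pvGet passport "hgt") (some (-2)) none
          let hS := PySem.Str.slice (pvGet passport "hgt") none (some (-2))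
          if !PySem.Str.strIsdigit hS then false
          else
            let h := pvInt hS
            -- the checks after the hgt branch, shared by the cm and in branches
            let rest : Bool :=
              if PySem.Str.len (pvGet passport "hcl") != 7 then false
              else if PySem.Str.pyGet? (pvGet passport "hcl") 0 != some '#' then false
              else
                let hcl := PySem.Str.slice (pvGet passport "hcl") (some 1) none
                if !(hcl.toList.all (fun x => ("0123456789abcdef".toList).contains x)) then false
                else if !((["amb", "blu", "brn", "gry", "grn", "hzl", "oth"]).contains (pvGet passport "ecl")) then false
                else if !PySem.Str.strIsdigit (pvGet passport "pid") then false
                else if PySem.Str.len (pvGet passport "pid") != 9 then false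
                else true
            if h_unit == "cm" then
              if h < 150 || h > 193 then false else rest
            else if h_unit == "in" then
              if h < 59 || h > 76 then false else rest
            else false

-- ===== PORT B =====
def pvHgtOk (s : String) : Bool :=
  let unit := PySem.Str.slice s (some (-2)) none
  let num := PySem.Str.slice s none (some (-2))
  if !PySem.Str.strIsdigit num then false
  else
    let n := pvInt num
    if unit == "cm" then decide (150 ≤ n) && decide (n ≤ 193)
    else if unit == "in" then decide (59 ≤ n) && decide (n ≤ 76)
    else false

def pvRules : List (String × (String → Bool)) :=
  [ ("byr", fun s => PySem.Str.strIsdigit s && (decide (1920 ≤ pvInt s) && decide (pvInt s ≤ 2002)))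
  , ("iyr", fun s => PySem.Str.strIsdigit s && (decide (2010 ≤ pvInt s) && decide (pvInt s ≤ 2020)))
  , ("eyr", fun s => PySem.Str.strIsdigit s && (decide (2020 ≤ pvInt s) && decide (pvInt s ≤ 2030)))
  , ("hgt", pvHgtOk)
  , ("hcl", fun s => (PySem.Str.len s == 7) && (PySem.Str.pyGet? s 0 == some '#')
        && (PySem.Str.slice s (some 1) none).toList.all (fun c => ("0123456789abcdef".toList).contains c))
  , ("ecl", fun s => (["amb", "blu", "brn", "gry", "grn", "hzl", "oth"]).contains s)
  , ("pid", fun s => PySem.Str.strIsdigit s && (PySem.Str.len s == 9)) ]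

def is_valid_part2_alt (passport : List (String × String)) : Bool :=
  if pvRules.any (fun r => !pvContains passport r.1) then false
  else pvRules.all (fun r => r.2 (pvGet passport r.1))

-- ===== PRECONDITION & SPEC =====
def Spec_is_valid_part2 (passport : List (String × String)) (out : Bool) : Prop := out = is_valid_part2_alt passport
instance (passport : List (String × String)) (out : Bool) : Decidable (Spec_is_valid_part2 passport out) := by unfold Spec_is_valid_part2; infer_instance

-- ===== CLAIM (what is proved, stated in full; the proofs are below) =====
def Claim_equal_is_valid_part2 : Prop := ∀ (passport : List (String × String)), Dom_is_valid_part2 passport → Spec_is_valid_part2 passport (is_valid_part2 passport)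

-- ===== LEMMAS AND PROOFS =====
-- if-chain step as a conjunction, used to flatten A's early-return chain
theorem pv_if_false (c r : Bool) : (if c = true then false else r) = (!c && r) := by cases c <;> simp
-- ===== VERDICT (by name: the statement is the Claim_ definition above) =====
theorem is_valid_part2_spec : Claim_equal_is_valid_part2 := by
  intro passport _
  unfold Spec_is_valid_part2
  simp only [is_valid_part2, is_valid_part2_alt, is_valid_part1, pvRules, pvHgtOk,
    List.all_cons, List.all_nil, List.any_cons, List.any_nil, Bool.and_true, Bool.or_false]
  cases hbyr : pvContains passport "byr" <;>
  cases hiyr : pvContains passport "iyr" <;>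
  cases heyr : pvContains passport "eyr" <;>
  cases hhgt : pvContains passport "hgt" <;>
  cases hhcl : pvContains passport "hcl" <;>
  cases hecl : pvContains passport "ecl" <;>
  cases hpid : pvContains passport "pid" <;>
    simp only [Bool.not_true, Bool.not_false, Bool.false_and, Bool.true_and,
      Bool.false_or, Bool.true_or, Bool.or_true, Bool.or_false, if_true, if_false,
      Bool.and_false, Bool.and_true, ite_true, ite_false]
  cases hcm : (PySem.Str.slice (pvGet passport "hgt") (some (-2)) none == "cm") with
  | true =>
    simp only [hcm, Bool.not_true, Bool.not_false, if_true, if_false, ite_true, ite_false]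
    simp only [← not_lt, decide_not, gt_iff_lt, bne]
    generalize (PySem.Str.strIsdigit (pvGet passport "byr")) = g1
    generalize (decide (pvInt (pvGet passport "byr") < 1920)) = g2
    generalize (decide (2002 < pvInt (pvGet passport "byr"))) = g3
    generalize (PySem.Str.strIsdigit (pvGet passport "iyr")) = g4
    generalize (decide (pvInt (pvGet passport "iyr") < 2010)) = g5
    generalize (decide (2020 < pvInt (pvGet passport "iyr"))) = g6
    generalize (PySem.Str.strIsdigit (pvGet passport "eyr")) = g7
    generalize (decide (pvInt (pvGet passport "eyr") < 2020)) = g8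
    generalize (decide (2030 < pvInt (pvGet passport "eyr"))) = g9
    generalize (PySem.Str.strIsdigit (PySem.Str.slice (pvGet passport "hgt") none (some (-2)))) = dh
    generalize (decide (pvInt (PySem.Str.slice (pvGet passport "hgt") none (some (-2))) < 150)) = h1
    generalize (decide (193 < pvInt (PySem.Str.slice (pvGet passport "hgt") none (some (-2))))) = h2
    generalize (PySem.Str.len (pvGet passport "hcl") == 7) = e1
    generalize (PySem.Str.pyGet? (pvGet passport "hcl") 0 == some '#') = e2
    generalize ((PySem.Str.slice (pvGet passport "hcl") (some 1) none).toList.all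
      (fun x => "0123456789abcdef".toList.contains x)) = e3
    generalize (["amb", "blu", "brn", "gry", "grn", "hzl", "oth"].contains (pvGet passport "ecl")) = e4
    simp [pv_if_false, Bool.not_or, Bool.beq_eq_decide_eq, Bool.and_assoc, Bool.and_comm, Bool.and_left_comm]
  | false =>
    cases hin : (PySem.Str.slice (pvGet passport "hgt") (some (-2)) none == "in") with
    | true =>
      simp only [hcm, hin, Bool.not_true, Bool.not_false, if_true, if_false, ite_true, ite_false]
      simp only [← not_lt, decide_not, gt_iff_lt, bne]
      generalize (PySem.Str.strIsdigit (pvGet passport "byr")) = g1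
      generalize (decide (pvInt (pvGet passport "byr") < 1920)) = g2
      generalize (decide (2002 < pvInt (pvGet passport "byr"))) = g3
      generalize (PySem.Str.strIsdigit (pvGet passport "iyr")) = g4
      generalize (decide (pvInt (pvGet passport "iyr") < 2010)) = g5
      generalize (decide (2020 < pvInt (pvGet passport "iyr"))) = g6
      generalize (PySem.Str.strIsdigit (pvGet passport "eyr")) = g7
      generalize (decide (pvInt (pvGet passport "eyr") < 2020)) = g8
      generalize (decide (2030 < pvInt (pvGet passport "eyr"))) = g9
      generalize (PySem.Str.strIsdigit (PySem.Str.slice (pvGet passport "hgt") none (some (-2)))) = dh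
      generalize (decide (pvInt (PySem.Str.slice (pvGet passport "hgt") none (some (-2))) < 59)) = h1
      generalize (decide (76 < pvInt (PySem.Str.slice (pvGet passport "hgt") none (some (-2))))) = h2
      generalize (PySem.Str.len (pvGet passport "hcl") == 7) = e1
      generalize (PySem.Str.pyGet? (pvGet passport "hcl") 0 == some '#') = e2
      generalize ((PySem.Str.slice (pvGet passport "hcl") (some 1) none).toList.all
        (fun x => "0123456789abcdef".toList.contains x)) = e3
      generalize (["amb", "blu", "brn", "gry", "grn", "hzl", "oth"].contains (pvGet passport "ecl")) = e4
      simp [pv_if_false, Bool.not_or, Bool.beq_eq_decide_eq, Bool.and_assoc, Bool.and_comm, Bool.and_left_comm]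
    | false =>
      simp [pv_if_false, Bool.not_or, Bool.and_assoc]
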